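-- pv_equiv track=rewrite | github.com/paulkugener/adventofcode | 2020/06.py | part2
-- ===== SOURCE A (Python) =====
-- def part2(declarations):
--     # For each group, count the number of questions to which **everyone** answered "yes". What is the sum of those counts?
--     # -> Intersection
--     result = 0
--     for group in declarations:
--         tmp_set = set("abcdefghijklmnopqrstuvwxyz")
--         for person_string in group:
--             tmp_set = tmp_set.intersection(person_string)
--         result += len(tmp_set)
--     return result
-- ===== SOURCE B (Python) =====
-- def part2(declarations):
--     # Count-and-compare: for each of the 26 fixed letters, count how many
--     # persons in the group answered it; the letter is common iff that count
--     # equals the group size. (Empty group: 0 == 0 for all 26 letters -> 26,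
--     # matching A's untouched full alphabet set.)
--     total = 0
--     for group in declarations:
--         n = len(group)
--         for letter in "abcdefghijklmnopqrstuvwxyz":
--             if sum(1 for person in group if letter in person) == n:
--                 total += 1
--     return total
-- ===== Notes on version B (the rewrite author's own statement) =====
-- stated objective: alternative
-- what changed: Replaces the progressive set-intersection per group by a count-and-compare pass over the fixed 26-letter alphabet: a letter is counted iff the number of persons answering it equals the group size.
import Mathlib
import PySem

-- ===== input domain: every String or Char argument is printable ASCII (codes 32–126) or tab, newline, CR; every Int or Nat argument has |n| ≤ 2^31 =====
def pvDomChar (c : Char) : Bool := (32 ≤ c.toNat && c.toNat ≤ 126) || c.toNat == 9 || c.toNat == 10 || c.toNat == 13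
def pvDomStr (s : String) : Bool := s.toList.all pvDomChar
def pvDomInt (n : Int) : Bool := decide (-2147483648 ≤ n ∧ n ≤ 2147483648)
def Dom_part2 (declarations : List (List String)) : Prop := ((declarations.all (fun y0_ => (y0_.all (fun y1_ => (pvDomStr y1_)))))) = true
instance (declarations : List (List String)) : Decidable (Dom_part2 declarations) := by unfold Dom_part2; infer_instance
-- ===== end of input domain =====

-- B replaces A's progressive per-group set intersection with a count-and-compare
-- pass over the fixed 26-letter alphabet (objective: alternative).


-- ===== PORT A =====
-- set("abc…z") is the 26 distinct lowercase letters; tmp_set.intersection(person_string)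
-- keeps exactly the members that are characters of person_string (exact on a nodup list).
def part2 (declarations : List (List String)) : Int :=
  declarations.foldl
    (fun result group =>
      result + Int.ofNat
        (group.foldl
          (fun tmp_set person => tmp_set.filter (fun c => person.toList.contains c))
          ("abcdefghijklmnopqrstuvwxyz".toList)).length)
    0

-- ===== PORT B =====
-- 'letter in person' for a one-character letter is character membership (exact).
def part2_alt (declarations : List (List String)) : Int :=
  declarations.foldl
    (fun total group =>
      "abcdefghijklmnopqrstuvwxyz".toList.foldl
        (fun t letter =>
          if (group.foldl (fun k person =>
                if person.toList.contains letter then k + 1 else k) (0 : Int))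
             = Int.ofNat group.length
          then t + 1 else t)
        total)
    0

-- ===== PRECONDITION & SPEC =====
def Spec_part2 (declarations : List (List String)) (out : Int) : Prop := out = part2_alt declarations
instance (declarations : List (List String)) (out : Int) : Decidable (Spec_part2 declarations out) := by unfold Spec_part2; infer_instance

-- ===== CLAIM (what is proved, stated in full; the proofs are below) =====
def Claim_equal_part2 : Prop := ∀ (declarations : List (List String)), Dom_part2 declarations → Spec_part2 declarations (part2 declarations)

-- ===== LEMMAS AND PROOFS =====

-- A's inner loop: repeated filtering equals one filter with the conjunction of all tests.
theorem foldl_filter_eq_filter_all (ps : List String) (l : List Char) :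
    ps.foldl (fun s p => s.filter (fun c => p.toList.contains c)) l
      = l.filter (fun c => ps.all (fun p => p.toList.contains c)) := by
  induction ps generalizing l with
  | nil => simp
  | cons p rest ih =>
      simp only [List.foldl_cons, ih, List.filter_filter, List.all_cons]
      exact List.filter_congr (fun c _ => by simp [Bool.and_comm])

-- B's inner count loop is countP.
theorem foldl_count_eq_countP (g : List String) (c : Char) (k : Int) :
    g.foldl (fun k p => if p.toList.contains c then k + 1 else k) k
      = k + Int.ofNat (g.countP (fun p => p.toList.contains c)) := by
  induction g generalizing k with
  | nil => simp
  | cons p rest ih =>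
      simp only [List.foldl_cons, List.countP_cons, ih]
      split_ifs with h <;> (simp only [Int.ofNat_eq_natCast]; push_cast; ring)

-- B's alphabet loop adds countP of the letter predicate.
theorem foldl_if_add_one (P : Char → Prop) [DecidablePred P] (l : List Char) (t : Int) :
    l.foldl (fun t c => if P c then t + 1 else t) t
      = t + Int.ofNat (l.countP (fun c => decide (P c))) := by
  induction l generalizing t with
  | nil => simp
  | cons c rest ih =>
      simp only [List.foldl_cons, List.countP_cons, ih, decide_eq_true_eq]
      split_ifs with h <;> (simp only [Int.ofNat_eq_natCast]; push_cast; ring)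

-- Per group, the two inner computations agree.
theorem group_eq (g : List String) :
    Int.ofNat (g.foldl
        (fun s p => s.filter (fun c => p.toList.contains c))
        ("abcdefghijklmnopqrstuvwxyz".toList)).length
      = "abcdefghijklmnopqrstuvwxyz".toList.foldl
          (fun t letter =>
            if (g.foldl (fun k person =>
                  if person.toList.contains letter then k + 1 else k) (0 : Int))
               = Int.ofNat g.length
            then t + 1 else t) 0 := by
  rw [foldl_filter_eq_filter_all,
      foldl_if_add_one (fun letter =>
        (g.foldl (fun k person => if person.toList.contains letter then k + 1 else k) (0 : Int))
          = Int.ofNat g.length)]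
  rw [zero_add, ← List.countP_eq_length_filter]
  congr 1
  refine List.countP_congr (fun c _ => ?_)
  rw [foldl_count_eq_countP, zero_add]
  rw [Bool.eq_iff_iff]
  simp only [List.all_eq_true, decide_eq_true_eq, Int.ofNat_eq_natCast, Nat.cast_inj,
    List.countP_eq_length, iff_true]

-- Both outer folds agree for any accumulator.
theorem folds_eq (ds : List (List String)) (acc : Int) :
    ds.foldl
      (fun result group =>
        result + Int.ofNat
          (group.foldl
            (fun tmp_set person => tmp_set.filter (fun c => person.toList.contains c))
            ("abcdefghijklmnopqrstuvwxyz".toList)).length) acc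
    = ds.foldl
        (fun total group =>
          "abcdefghijklmnopqrstuvwxyz".toList.foldl
            (fun t letter =>
              if (group.foldl (fun k person =>
                    if person.toList.contains letter then k + 1 else k) (0 : Int))
                 = Int.ofNat group.length
              then t + 1 else t)
            total) acc := by
  induction ds generalizing acc with
  | nil => rfl
  | cons g rest ih =>
      simp only [List.foldl_cons]
      rw [group_eq g,
        foldl_if_add_one (fun letter =>
          (g.foldl (fun k person => if person.toList.contains letter then k + 1 else k) (0 : Int))
            = Int.ofNat g.length),
        foldl_if_add_one (fun letter =>
          (g.foldl (fun k person => if person.toList.contains letter then k + 1 else k) (0 : Int))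
            = Int.ofNat g.length),
        zero_add]
      exact ih _

-- ===== VERDICT (by name: the statement is the Claim_ definition above) =====
theorem part2_spec : Claim_equal_part2 := by
  intro ds _
  unfold Spec_part2 part2 part2_alt
  exact folds_eq ds 0
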